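-- pv_equiv track=rewrite | github.com/Enot3811/Leet_code | yandex/algorithms_2024/task_2F.py | sum_all_products
-- ===== SOURCE A (Python) =====
-- MOD = 1000000007
--
-- def sum_all_products(arr: list[int]) -> int:
--     n = len(arr)
--     # Посчитаем суммы слева-направо и справа-налево
--     left_right_sum = [0] * n
--     right_left_sum = [0] * n
--
--     left_right_sum[0] = arr[0] % MOD  # операции с большими числами - медленные.
--     # Но при этом деление с остатком можно внести в скобки, и это не повлияет
--     # на итоговый результат
--     for i in range(1, n):
--         left_right_sum[i] = (arr[i] + left_right_sum[i - 1]) % MOD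
--
--     right_left_sum[-1] = arr[-1] % MOD
--     for i in range(n - 2, -1, -1):
--         right_left_sum[i] = (arr[i] + right_left_sum[i + 1]) % MOD
--
--     # Теперь проходим j индексом, пользуясь суммами справа и слева
--     result = 0
--     for j in range(1, n - 1):
--         result = (result + arr[j] * left_right_sum[j - 1] * right_left_sum[j + 1]) % MOD
--     return result
-- ===== SOURCE B (Python) =====
-- MOD = 1000000007
-- INV6 = 166666668  # modular inverse of 6 modulo MOD (6 * INV6 % MOD == 1)
--
--
-- def sum_all_products(arr: list[int]) -> int:
--     # Newton's identity: 6*e3 = p1^3 - 3*p1*p2 + 2*p3 over the power sums.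
--     p1 = p2 = p3 = 0
--     for x in arr:
--         p1 = (p1 + x) % MOD
--         p2 = (p2 + x * x) % MOD
--         p3 = (p3 + x * x * x) % MOD
--     return (p1 * p1 * p1 - 3 * p1 * p2 + 2 * p3) * INV6 % MOD
-- ===== Notes on version B (the rewrite author's own statement) =====
-- stated objective: simpler
-- what changed: Replaces the prefix-sum/suffix-sum arrays plus middle-index loop by a single pass accumulating the three power sums p1,p2,p3 mod MOD and returning (p1^3-3*p1*p2+2*p3)*inv6 mod MOD via Newton's identity for e3.
import Mathlib
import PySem

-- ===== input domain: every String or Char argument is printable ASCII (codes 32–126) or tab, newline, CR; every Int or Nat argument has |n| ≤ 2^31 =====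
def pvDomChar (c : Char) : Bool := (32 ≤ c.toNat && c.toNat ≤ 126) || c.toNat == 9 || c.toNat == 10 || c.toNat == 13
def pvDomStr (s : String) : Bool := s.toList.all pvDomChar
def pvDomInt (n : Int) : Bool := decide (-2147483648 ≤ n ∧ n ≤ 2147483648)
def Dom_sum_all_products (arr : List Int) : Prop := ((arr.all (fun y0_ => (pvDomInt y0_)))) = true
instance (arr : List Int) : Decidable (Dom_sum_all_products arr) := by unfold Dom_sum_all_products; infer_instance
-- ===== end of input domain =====

-- B replaces A's prefix/suffix-sum arrays and middle-index loop by one pass of power sums and Newton's identity for e₃ (objective: simpler).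

-- ===== PORT A =====
def pvMOD : Int := 1000000007

-- loop body of `for i in range(1, n): left_right_sum[i] = (arr[i] + left_right_sum[i-1]) % MOD`
def pvStepLR (arr : List Int) (l : List Int) (i : Int) : List Int :=
  PySem.List.pySetD l i (PySem.Int.mod (PySem.List.pyGetD arr i 0 + PySem.List.pyGetD l (i - 1) 0) pvMOD)

-- `left_right_sum` after its loop (`[0]*n`, `left_right_sum[0] = arr[0] % MOD`, then the loop);
-- on the empty list Python raises IndexError here: excluded by Pre_
def pvLR (arr : List Int) : List Int :=
  (PySem.List.pyRange 1 (PySem.List.len arr) 1).foldl (pvStepLR arr)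
    (PySem.List.pySetD (List.replicate (PySem.List.len arr).toNat 0) 0
      (PySem.Int.mod (PySem.List.pyGetD arr 0 0) pvMOD))

-- loop body of `for i in range(n-2, -1, -1): right_left_sum[i] = (arr[i] + right_left_sum[i+1]) % MOD`
def pvStepRL (arr : List Int) (l : List Int) (i : Int) : List Int :=
  PySem.List.pySetD l i (PySem.Int.mod (PySem.List.pyGetD arr i 0 + PySem.List.pyGetD l (i + 1) 0) pvMOD)

-- `right_left_sum` after its loop (`[0]*n`, `right_left_sum[-1] = arr[-1] % MOD`, then the loop)
def pvRL (arr : List Int) : List Int :=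
  (PySem.List.pyRange (PySem.List.len arr - 2) (-1) (-1)).foldl (pvStepRL arr)
    (PySem.List.pySetD (List.replicate (PySem.List.len arr).toNat 0) (-1)
      (PySem.Int.mod (PySem.List.pyGetD arr (-1) 0) pvMOD))

-- loop body of `for j in range(1, n-1): result = (result + arr[j]*lr[j-1]*rl[j+1]) % MOD`
def pvStepRes (arr lr rl : List Int) (result : Int) (j : Int) : Int :=
  PySem.Int.mod (result + PySem.List.pyGetD arr j 0 * PySem.List.pyGetD lr (j - 1) 0 *
    PySem.List.pyGetD rl (j + 1) 0) pvMOD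

def sum_all_products (arr : List Int) : Int :=
  (PySem.List.pyRange 1 (PySem.List.len arr - 1) 1).foldl
    (pvStepRes arr (pvLR arr) (pvRL arr)) 0

-- ===== PORT B =====
def pvINV6 : Int := 166666668  -- modular inverse of 6 modulo MOD (6 * INV6 % MOD == 1)

-- loop body of B's single pass accumulating (p1, p2, p3) mod MOD
def pvStepPows (s : Int × Int × Int) (x : Int) : Int × Int × Int :=
  (PySem.Int.mod (s.1 + x) pvMOD, PySem.Int.mod (s.2.1 + x * x) pvMOD,
   PySem.Int.mod (s.2.2 + x * x * x) pvMOD)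

def sum_all_products_alt (arr : List Int) : Int :=
  let p := arr.foldl pvStepPows (0, 0, 0)
  PySem.Int.mod ((p.1 * p.1 * p.1 - 3 * p.1 * p.2.1 + 2 * p.2.2) * pvINV6) pvMOD

-- ===== PRECONDITION & SPEC =====
-- Pre_ excludes only the empty list, on which A raises IndexError at its first subscript.
def Pre_sum_all_products (arr : List Int) : Prop := arr ≠ []
instance (arr : List Int) : Decidable (Pre_sum_all_products arr) := by
  unfold Pre_sum_all_products; infer_instance

def pvWitness_sum_all_products : List Int := [1, 2, 3]

def Spec_sum_all_products (arr : List Int) (out : Int) : Prop := out = sum_all_products_alt arr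
instance (arr : List Int) (out : Int) : Decidable (Spec_sum_all_products arr out) := by
  unfold Spec_sum_all_products; infer_instance

-- ===== CLAIM (what is proved, stated in full; the proofs are below) =====
def Claim_equal_sum_all_products : Prop := ∀ (arr : List Int), Dom_sum_all_products arr →
  Pre_sum_all_products arr → Spec_sum_all_products arr (sum_all_products arr)

-- ===== LEMMAS AND PROOFS =====

-- e₂ and e₃ of a list by structural recursion (the mathematical bridge between the two ports)
def pvU : List Int → Int
  | [] => 0
  | x :: l => x * l.sum + pvU l

def pvT : List Int → Int
  | [] => 0
  | x :: l => x * pvU l + pvT l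

lemma pv_mod_eq (a : Int) : PySem.Int.mod a pvMOD = a % 1000000007 :=
  PySem.Int.mod_eq_emod_of_pos (by norm_num [pvMOD])

lemma pv_add_emod (x y : Int) : (x + y % 1000000007) % 1000000007 = (x + y) % 1000000007 := by
  conv_lhs => rw [Int.add_emod]
  rw [Int.emod_emod_of_dvd _ dvd_rfl, ← Int.add_emod]

lemma pv_cast_mod (a : Int) :
    ((a % 1000000007 : Int) : ZMod 1000000007) = (a : ZMod 1000000007) := by
  have h := ZMod.intCast_mod a 1000000007
  norm_num at h
  exact h

lemma pv_int_eq (x y : Int) (hx0 : 0 ≤ x) (hx : x < 1000000007) (hy0 : 0 ≤ y)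
    (hy : y < 1000000007) (hc : (x : ZMod 1000000007) = (y : ZMod 1000000007)) : x = y := by
  have h := (ZMod.intCast_eq_intCast_iff x y 1000000007).mp hc
  unfold Int.ModEq at h
  push_cast at h
  rw [Int.emod_eq_of_lt hx0 hx, Int.emod_eq_of_lt hy0 hy] at h
  exact h

lemma pv_newton_u (l : List Int) :
    2 * pvU l = l.sum * l.sum - (l.map (fun x => x * x)).sum := by
  induction l with
  | nil => simp [pvU]
  | cons x t ih =>
    simp only [pvU, List.sum_cons, List.map_cons]
    linear_combination ih

lemma pv_newton_t (l : List Int) :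
    6 * pvT l = l.sum * l.sum * l.sum - 3 * l.sum * (l.map (fun x => x * x)).sum
      + 2 * (l.map (fun x => x * x * x)).sum := by
  induction l with
  | nil => simp [pvT]
  | cons x t ih =>
    simp only [pvT, List.sum_cons, List.map_cons]
    linear_combination 3 * x * pv_newton_u t + ih

lemma pv_V (a : List Int) :
    ((List.range a.length).map (fun j => a.getD j 0 * (a.drop (j + 1)).sum)).sum = pvU a := by
  induction a with
  | nil => simp [pvU]
  | cons x t ih =>
    rw [List.length_cons, List.range_succ_eq_map, List.map_cons, List.sum_cons, List.map_map]
    have hmap : (List.range t.length).map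
        ((fun j => (x :: t).getD j 0 * ((x :: t).drop (j + 1)).sum) ∘ Nat.succ)
        = (List.range t.length).map (fun j => t.getD j 0 * (t.drop (j + 1)).sum) := by
      apply List.map_eq_map_iff.mpr
      intro j hj
      simp [Function.comp, List.drop_succ_cons, Nat.succ_eq_add_one]
    rw [hmap, ih]
    simp [pvU]

lemma pv_W (a : List Int) :
    ((List.range a.length).map
      (fun j => a.getD j 0 * (a.take j).sum * (a.drop (j + 1)).sum)).sum = pvT a := by
  induction a with
  | nil => simp [pvT]
  | cons x t ih =>
    rw [List.length_cons, List.range_succ_eq_map, List.map_cons, List.sum_cons, List.map_map]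
    have hmap : (List.range t.length).map
        ((fun j => (x :: t).getD j 0 * ((x :: t).take j).sum * ((x :: t).drop (j + 1)).sum) ∘ Nat.succ)
        = (List.range t.length).map
            (fun j => x * (t.getD j 0 * (t.drop (j + 1)).sum)
              + t.getD j 0 * (t.take j).sum * (t.drop (j + 1)).sum) := by
      apply List.map_eq_map_iff.mpr
      intro j hj
      simp only [Function.comp, Nat.succ_eq_add_one, List.getD_cons_succ, List.take_succ_cons,
        List.drop_succ_cons, List.sum_cons]
      ring
    rw [hmap, PySem.List.sum_map_add_int, PySem.List.sum_map_const_mul_int, pv_V, ih]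
    simp [pvT]

lemma pv_sumW2 (a : List Int) (h2 : 2 ≤ a.length) :
    ((PySem.List.pyRange 1 ((a.length : Int) - 1) 1).map
      (fun j => a.getD j.toNat 0 * (a.take j.toNat).sum * (a.drop (j.toNat + 1)).sum)).sum
      = pvT a := by
  rw [PySem.List.pyRange_one]
  rw [show ((a.length : Int) - 1 - 1).toNat = a.length - 2 from by omega]
  rw [List.map_map]
  have hmap : (List.range (a.length - 2)).map
      ((fun j : Int => a.getD j.toNat 0 * (a.take j.toNat).sum * (a.drop (j.toNat + 1)).sum)
        ∘ (fun k : ℕ => (1 : Int) + k))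
      = (List.range (a.length - 2)).map
          (fun k : ℕ => a.getD (k + 1) 0 * (a.take (k + 1)).sum * (a.drop (k + 1 + 1)).sum) := by
    apply List.map_eq_map_iff.mpr
    intro k hk
    simp only [Function.comp]
    rw [show ((1 : Int) + (k : Int)).toNat = k + 1 from by omega]
  rw [hmap, ← pv_W a]
  rw [show List.range a.length = List.range (a.length - 1) ++ [a.length - 1] from by
    rw [← List.range_succ]; congr 1; omega]
  rw [show List.range (a.length - 1) = 0 :: (List.range (a.length - 2)).map Nat.succ from by
    rw [← List.range_succ_eq_map]; congr 1; omega]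
  rw [List.map_append, List.sum_append, List.map_cons, List.sum_cons, List.map_map]
  simp only [List.map_cons, List.map_nil, List.sum_cons, List.sum_nil]
  rw [List.drop_eq_nil_of_le (show a.length ≤ a.length - 1 + 1 from by omega)]
  have hmap2 : (List.range (a.length - 2)).map
      ((fun j => a.getD j 0 * (a.take j).sum * (a.drop (j + 1)).sum) ∘ Nat.succ)
      = (List.range (a.length - 2)).map
          (fun k => a.getD (k + 1) 0 * (a.take (k + 1)).sum * (a.drop (k + 1 + 1)).sum) := by
    apply List.map_eq_map_iff.mpr
    intro k hk
    rfl
  rw [hmap2]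
  simp

lemma pv_sumW (a : List Int) (h : a ≠ []) :
    ((PySem.List.pyRange 1 ((a.length : Int) - 1) 1).map
      (fun j => a.getD j.toNat 0 * (a.take j.toNat).sum * (a.drop (j.toNat + 1)).sum)).sum
      = pvT a := by
  match a, h with
  | [x], _ =>
    rw [PySem.List.pyRange_one_eq_nil (by norm_num)]
    simp [pvT, pvU]
  | x :: y :: t, _ => exact pv_sumW2 _ (by simp)

lemma pv_setD_neg_one (xs : List Int) (v : Int) (h : xs ≠ []) :
    PySem.List.pySetD xs (-1) v = xs.set (xs.length - 1) v := by
  have hl : xs.length ≠ 0 := by simpa using h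
  have h1 : 1 ≤ xs.length := by omega
  simp [PySem.List.pySetD, PySem.List.pySet?, PySem.List.pyIdx?, h1]

lemma pv_range_down_snoc (A b : Int) (h : b ≤ A) :
    PySem.List.pyRange A (b - 1) (-1) = PySem.List.pyRange A b (-1) ++ [b] := by
  rw [PySem.List.pyRange_neg_one_eq_reverse, PySem.List.pyRange_neg_one_eq_reverse]
  rw [show b - 1 + 1 = b by ring]
  rw [PySem.List.pyRange_one_cons (by omega)]
  simp

lemma pv_take_one (a : List Int) (h : a ≠ []) : (a.take 1).sum = a.getD 0 0 := by
  match a, h with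
  | x :: t, _ => simp

lemma pv_lr_inv (a : List Int) (h : a ≠ []) (k : ℕ) (hk1 : 1 ≤ k) (hk : k ≤ a.length) :
    (PySem.List.pyRange 1 (k : Int) 1).foldl (pvStepLR a)
      (PySem.List.pySetD (List.replicate a.length 0) 0
        (PySem.Int.mod (PySem.List.pyGetD a 0 0) pvMOD))
    = (List.range a.length).map
        (fun i => if i < k then (a.take (i + 1)).sum % 1000000007 else 0) := by
  induction k, hk1 using Nat.le_induction with
  | base =>
    rw [show ((1 : ℕ) : Int) = 1 from rfl, PySem.List.pyRange_one_eq_nil (by norm_num)]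
    rw [List.foldl_nil, PySem.List.pyGetD_zero, pv_mod_eq]
    rw [show PySem.List.pySetD (List.replicate a.length (0 : Int)) 0 (a.getD 0 0 % 1000000007)
        = (List.replicate a.length (0 : Int)).set 0 (a.getD 0 0 % 1000000007) from by
      rw [PySem.List.pySetD_of_nonneg _ _ (by norm_num)]; rfl]
    apply List.ext_getElem
    · simp
    · intro i hi1 hi2
      have hin : i < a.length := by simpa using hi2
      simp only [List.getElem_set, List.getElem_replicate, List.getElem_map, List.getElem_range]
      by_cases hki : 0 = i
      · rw [if_pos hki, if_pos (by omega), ← hki, pv_take_one a h]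
      · rw [if_neg hki, if_neg (by omega)]
  | succ k hk1 ih =>
    rw [show ((k + 1 : ℕ) : Int) = (k : Int) + 1 from by push_cast; ring]
    rw [PySem.List.pyRange_one_succ_right (by omega)]
    rw [List.foldl_append, ih (by omega), List.foldl_cons, List.foldl_nil]
    unfold pvStepLR
    rw [show ((k : Int) - 1) = ((k - 1 : ℕ) : Int) from by omega]
    rw [PySem.List.pyGetD_natCast, PySem.List.pyGetD_natCast, PySem.List.pySetD_natCast]
    rw [PySem.List.getD_map_range _ _ _ _ (by omega)]
    rw [if_pos (by omega : k - 1 < k), show k - 1 + 1 = k from by omega]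
    rw [pv_mod_eq, pv_add_emod]
    apply List.ext_getElem
    · simp
    · intro i hi1 hi2
      have hin : i < a.length := by simpa using hi2
      simp only [List.getElem_set, List.getElem_map, List.getElem_range]
      by_cases hki : k = i
      · rw [if_pos hki, if_pos (by omega), ← hki,
          List.sum_take_succ _ _ (by omega), List.getD_eq_getElem _ _ (by omega)]
        ring_nf
      · rw [if_neg hki]
        split_ifs <;> omega

lemma pv_rl_inv (a : List Int) (h : a ≠ []) (d : ℕ) (hd : d ≤ a.length - 1) :
    (PySem.List.pyRange ((a.length : Int) - 2) (((a.length - 1 - d : ℕ) : Int) - 1) (-1)).foldl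
      (pvStepRL a)
      (PySem.List.pySetD (List.replicate a.length 0) (-1)
        (PySem.Int.mod (PySem.List.pyGetD a (-1) 0) pvMOD))
    = (List.range a.length).map
        (fun i => if a.length - 1 - d ≤ i then (a.drop i).sum % 1000000007 else 0) := by
  have hn : 1 ≤ a.length := by
    cases a with
    | nil => exact absurd rfl h
    | cons x t => simp
  induction d with
  | zero =>
    rw [show (((a.length - 1 - 0 : ℕ) : Int) - 1) = (a.length : Int) - 2 from by omega]
    rw [PySem.List.pyRange_neg_one_eq_nil (by omega), List.foldl_nil]
    rw [PySem.List.pyGetD_neg_one a 0 h, pv_mod_eq]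
    rw [pv_setD_neg_one _ _ (by
      intro hc
      have : (List.replicate a.length (0 : Int)).length = 0 := by rw [hc]; rfl
      rw [List.length_replicate] at this
      omega)]
    rw [List.length_replicate]
    apply List.ext_getElem
    · simp
    · intro i hi1 hi2
      have hin : i < a.length := by simpa using hi2
      simp only [List.getElem_set, List.getElem_replicate, List.getElem_map, List.getElem_range]
      by_cases hki : a.length - 1 = i
      · rw [if_pos hki, if_pos (by omega), ← hki, List.getLast_eq_getElem h,
          List.drop_eq_getElem_cons (by omega : a.length - 1 < a.length),
          show a.length - 1 + 1 = a.length from by omega,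
          List.drop_length, List.sum_cons, List.sum_nil, add_zero]
      · rw [if_neg hki, if_neg (by omega)]
  | succ d ihd =>
    have ih := ihd (by omega)
    rw [show a.length - 1 - d = a.length - 2 - d + 1 from by omega] at ih
    rw [show (((a.length - 1 - (d + 1) : ℕ) : Int) - 1)
        = ((a.length - 2 - d : ℕ) : Int) - 1 from by omega]
    rw [pv_range_down_snoc _ _ (by omega)]
    rw [show ((a.length - 2 - d : ℕ) : Int) = ((a.length - 2 - d + 1 : ℕ) : Int) - 1 from by
      push_cast; ring]
    rw [List.foldl_append, ih, List.foldl_cons, List.foldl_nil]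
    unfold pvStepRL
    rw [show ((a.length - 2 - d + 1 : ℕ) : Int) - 1 = ((a.length - 2 - d : ℕ) : Int) from by
      push_cast; ring]
    rw [show ((a.length - 2 - d : ℕ) : Int) + 1 = ((a.length - 2 - d + 1 : ℕ) : Int) from by
      push_cast; ring]
    rw [PySem.List.pyGetD_natCast, PySem.List.pyGetD_natCast, PySem.List.pySetD_natCast]
    rw [PySem.List.getD_map_range _ _ _ _ (by omega)]
    rw [if_pos (le_refl (a.length - 2 - d + 1))]
    rw [pv_mod_eq, pv_add_emod]
    apply List.ext_getElem
    · simp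
    · intro i hi1 hi2
      have hin : i < a.length := by simpa using hi2
      simp only [List.getElem_set, List.getElem_map, List.getElem_range]
      by_cases hki : a.length - 2 - d = i
      · rw [if_pos hki, if_pos (by omega), ← hki,
          List.drop_eq_getElem_cons (show a.length - 2 - d < a.length from by omega),
          List.sum_cons, List.getD_eq_getElem _ _ (by omega)]
      · rw [if_neg hki]
        split_ifs <;> omega

lemma pv_modfold_bounds (f : Int → Int) (l : List Int) (r0 : Int) (h0 : 0 ≤ r0)
    (h1 : r0 < 1000000007) :
    0 ≤ l.foldl (fun r j => (r + f j) % 1000000007) r0 ∧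
      l.foldl (fun r j => (r + f j) % 1000000007) r0 < 1000000007 := by
  induction l generalizing r0 with
  | nil => exact ⟨h0, h1⟩
  | cons x t ih =>
    exact ih _ (Int.emod_nonneg _ (by norm_num)) (Int.emod_lt_of_pos _ (by norm_num))

lemma pv_modfold_cast (f : Int → Int) (l : List Int) (r0 : Int) :
    ((l.foldl (fun r j => (r + f j) % 1000000007) r0 : Int) : ZMod 1000000007)
    = (r0 : ZMod 1000000007) + (l.map (fun j => ((f j : Int) : ZMod 1000000007))).sum := by
  induction l generalizing r0 with
  | nil => simp
  | cons x t ih =>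
    simp only [List.foldl_cons, List.map_cons, List.sum_cons, ih, pv_cast_mod]
    push_cast
    ring

lemma pv_stepres_eq (a lr rl : List Int) :
    pvStepRes a lr rl = (fun r j => (r + (PySem.List.pyGetD a j 0 *
      PySem.List.pyGetD lr (j - 1) 0 * PySem.List.pyGetD rl (j + 1) 0)) % 1000000007) := by
  funext r j
  simp [pvStepRes, pv_mod_eq]

lemma pv_LR_eq (a : List Int) (h : a ≠ []) :
    pvLR a = (List.range a.length).map (fun i => (a.take (i + 1)).sum % 1000000007) := by
  have hn : 1 ≤ a.length := by
    cases a with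
    | nil => exact absurd rfl h
    | cons x t => simp
  unfold pvLR
  rw [PySem.List.len_eq, Int.toNat_natCast]
  rw [pv_lr_inv a h a.length hn le_rfl]
  apply List.map_eq_map_iff.mpr
  intro i hi
  rw [List.mem_range] at hi
  rw [if_pos hi]

lemma pv_RL_eq (a : List Int) (h : a ≠ []) :
    pvRL a = (List.range a.length).map (fun i => (a.drop i).sum % 1000000007) := by
  have hn : 1 ≤ a.length := by
    cases a with
    | nil => exact absurd rfl h
    | cons x t => simp
  have hrl := pv_rl_inv a h (a.length - 1) le_rfl
  rw [show a.length - 1 - (a.length - 1) = 0 from by omega] at hrl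
  rw [show (((0 : ℕ) : Int) - 1) = -1 from by norm_num] at hrl
  unfold pvRL
  rw [PySem.List.len_eq, Int.toNat_natCast]
  rw [hrl]
  apply List.map_eq_map_iff.mpr
  intro i hi
  rw [if_pos (by omega)]

lemma pv_altfold (l : List Int) (p q r : Int) :
    (((l.foldl pvStepPows (p, q, r)).1 : Int) : ZMod 1000000007)
        = (p : ZMod 1000000007) + ((l.sum : Int) : ZMod 1000000007) ∧
      (((l.foldl pvStepPows (p, q, r)).2.1 : Int) : ZMod 1000000007)
        = (q : ZMod 1000000007) + (((l.map (fun x => x * x)).sum : Int) : ZMod 1000000007) ∧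
      (((l.foldl pvStepPows (p, q, r)).2.2 : Int) : ZMod 1000000007)
        = (r : ZMod 1000000007) + (((l.map (fun x => x * x * x)).sum : Int) : ZMod 1000000007) := by
  induction l generalizing p q r with
  | nil => simp
  | cons x t ih =>
    simp only [List.foldl_cons, List.map_cons, List.sum_cons, pvStepPows, pv_mod_eq]
    obtain ⟨h1, h2, h3⟩ := ih ((p + x) % 1000000007) ((q + x * x) % 1000000007)
      ((r + x * x * x) % 1000000007)
    refine ⟨?_, ?_, ?_⟩
    · rw [h1, pv_cast_mod]; push_cast; ring
    · rw [h2, pv_cast_mod]; push_cast; ring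
    · rw [h3, pv_cast_mod]; push_cast; ring

lemma pv_A_bounds (a : List Int) :
    0 ≤ sum_all_products a ∧ sum_all_products a < 1000000007 := by
  unfold sum_all_products
  rw [pv_stepres_eq]
  exact pv_modfold_bounds _ _ 0 (by norm_num) (by norm_num)

lemma pv_B_bounds (a : List Int) :
    0 ≤ sum_all_products_alt a ∧ sum_all_products_alt a < 1000000007 := by
  unfold sum_all_products_alt
  simp only [pv_mod_eq]
  exact ⟨Int.emod_nonneg _ (by norm_num), Int.emod_lt_of_pos _ (by norm_num)⟩

lemma pv_A_cast (a : List Int) (h : a ≠ []) :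
    ((sum_all_products a : Int) : ZMod 1000000007) = ((pvT a : Int) : ZMod 1000000007) := by
  unfold sum_all_products
  rw [pv_stepres_eq, pv_modfold_cast, pv_LR_eq a h, pv_RL_eq a h, PySem.List.len_eq]
  rw [show ((0 : Int) : ZMod 1000000007) = 0 from by norm_num, zero_add]
  have hmap : (PySem.List.pyRange 1 ((a.length : Int) - 1) 1).map
      (fun j => ((PySem.List.pyGetD a j 0 *
        PySem.List.pyGetD ((List.range a.length).map
          (fun i => (a.take (i + 1)).sum % 1000000007)) (j - 1) 0 *
        PySem.List.pyGetD ((List.range a.length).map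
          (fun i => (a.drop i).sum % 1000000007)) (j + 1) 0 : Int) : ZMod 1000000007))
      = (PySem.List.pyRange 1 ((a.length : Int) - 1) 1).map
          (fun j => ((a.getD j.toNat 0 * (a.take j.toNat).sum
            * (a.drop (j.toNat + 1)).sum : Int) : ZMod 1000000007)) := by
    apply List.map_eq_map_iff.mpr
    intro j hj
    rw [PySem.List.mem_pyRange_one] at hj
    obtain ⟨hj1, hj2⟩ := hj
    rw [show j = ((j.toNat : ℕ) : Int) from (Int.toNat_of_nonneg (by omega)).symm]
    rw [show ((j.toNat : ℕ) : Int) - 1 = ((j.toNat - 1 : ℕ) : Int) from by omega]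
    rw [show ((j.toNat : ℕ) : Int) + 1 = ((j.toNat + 1 : ℕ) : Int) from by push_cast; ring]
    rw [PySem.List.pyGetD_natCast, PySem.List.pyGetD_natCast, PySem.List.pyGetD_natCast]
    rw [PySem.List.getD_map_range _ _ _ _ (by omega),
      PySem.List.getD_map_range _ _ _ _ (by omega)]
    rw [show j.toNat - 1 + 1 = j.toNat from by omega, Int.toNat_natCast]
    push_cast [pv_cast_mod]
    ring
  rw [hmap]
  rw [show (fun j : Int => ((a.getD j.toNat 0 * (a.take j.toNat).sum
        * (a.drop (j.toNat + 1)).sum : Int) : ZMod 1000000007))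
      = (fun z : Int => (z : ZMod 1000000007)) ∘ (fun j : Int => a.getD j.toNat 0
        * (a.take j.toNat).sum * (a.drop (j.toNat + 1)).sum) from rfl]
  rw [← List.map_map, ← Int.cast_list_sum, pv_sumW a h]

lemma pv_B_cast (a : List Int) :
    ((sum_all_products_alt a : Int) : ZMod 1000000007) = ((pvT a : Int) : ZMod 1000000007) := by
  unfold sum_all_products_alt
  obtain ⟨h1, h2, h3⟩ := pv_altfold a 0 0 0
  simp only [pv_mod_eq]
  rw [pv_cast_mod]
  push_cast
  rw [h1, h2, h3]
  have h6 : (6 : ZMod 1000000007) * (166666668 : ZMod 1000000007) = 1 := by decide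
  have hN := congrArg (fun z : Int => (z : ZMod 1000000007)) (pv_newton_t a)
  push_cast at hN
  simp only [pvINV6]
  push_cast
  linear_combination (-(166666668 : ZMod 1000000007)) * hN
    + ((pvT a : Int) : ZMod 1000000007) * h6

-- ===== VERDICT (by name: the statement is the Claim_ definition above) =====
theorem sum_all_products_spec : Claim_equal_sum_all_products := by
  intro arr _ hpre
  unfold Spec_sum_all_products
  obtain ⟨ha0, ha1⟩ := pv_A_bounds arr
  obtain ⟨hb0, hb1⟩ := pv_B_bounds arr
  exact pv_int_eq _ _ ha0 ha1 hb0 hb1 ((pv_A_cast arr hpre).trans (pv_B_cast arr).symm)
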